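-- pv_equiv track=rewrite | github.com/Mhairi/LearningPython | mousetrackerproc/mousetracker_processing.py | self_chips
-- ===== SOURCE A (Python) =====
-- def self_chips(line):
--     pid = ""
--     answer = ""
--     for i, char in enumerate(line):
--         if i <= 6:
--             pid = str(pid) + str(char)
--         if i > 63 and i < 67:
--             answer = answer + char
--     return [pid, answer]
-- ===== SOURCE B (Python) =====
-- def self_chips(line):
--     return [line[:7], line[64:67]]
-- ===== Notes on version B (the rewrite author's own statement) =====
-- stated objective: simpler
-- what changed: Replaces the per-character enumerate loop with two conditionally-accumulated strings by two direct slices line[:7] and line[64:67], removing the loop and branches entirely.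
import Mathlib
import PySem

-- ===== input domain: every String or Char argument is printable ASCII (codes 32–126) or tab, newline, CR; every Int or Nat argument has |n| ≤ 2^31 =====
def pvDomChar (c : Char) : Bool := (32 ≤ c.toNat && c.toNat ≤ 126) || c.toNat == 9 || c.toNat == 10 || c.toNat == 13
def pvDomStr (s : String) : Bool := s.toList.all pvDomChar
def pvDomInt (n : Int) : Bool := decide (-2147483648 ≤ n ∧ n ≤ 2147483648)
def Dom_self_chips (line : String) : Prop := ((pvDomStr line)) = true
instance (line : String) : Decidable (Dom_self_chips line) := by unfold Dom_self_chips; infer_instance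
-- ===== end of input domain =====

-- B replaces A's per-character accumulation loop with two direct slices (simpler, no loop or branches).

-- ===== PORT A =====
def selfChipsStep (acc : List Char × List Char) (ic : Int × Char) : List Char × List Char :=
  let p := if ic.1 ≤ 6 then acc.1 ++ [ic.2] else acc.1
  let a := if 63 < ic.1 ∧ ic.1 < 67 then acc.2 ++ [ic.2] else acc.2
  (p, a)

def self_chips (line : String) : List String :=
  let st := (PySem.List.enumerate line.toList 0).foldl selfChipsStep ([], [])
  [String.mk st.1, String.mk st.2]

-- ===== PORT B =====
def self_chips_alt (line : String) : List String :=
  [String.mk (PySem.List.slice line.toList none (some 7)),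
   String.mk (PySem.List.slice line.toList (some 64) (some 67))]

-- ===== PRECONDITION & SPEC =====
def Spec_self_chips (line : String) (out : List String) : Prop := out = self_chips_alt line
instance (line : String) (out : List String) : Decidable (Spec_self_chips line out) := by unfold Spec_self_chips; infer_instance

-- ===== CLAIM (what is proved, stated in full; the proofs are below) =====
def Claim_equal_self_chips : Prop := ∀ (line : String), Dom_self_chips line → Spec_self_chips line (self_chips line)

-- ===== LEMMAS AND PROOFS =====


lemma selfChips_loop (xs : List Char) (s : Nat) (p a : List Char) :
    (PySem.List.enumerate xs (s : Int)).foldl selfChipsStep (p, a)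
      = (p ++ xs.take (7 - s), a ++ (xs.drop (64 - s)).take (67 - max 64 s)) := by
  induction xs generalizing s p a with
  | nil => simp [PySem.List.enumerate_nil]
  | cons c t ih =>
    rw [PySem.List.enumerate_cons, List.foldl_cons]
    have hs : ((s : Int) + 1) = ((s + 1 : Nat) : Int) := by push_cast; ring
    by_cases h6 : s ≤ 6
    · have hc : (s : Int) ≤ 6 := by exact_mod_cast h6
      have hna : ¬ (63 < (s : Int) ∧ (s : Int) < 67) := by omega
      rw [show selfChipsStep (p, a) ((s : Int), c) = (p ++ [c], a) from by
        show (if (s : Int) ≤ 6 then p ++ [c] else p,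
              if 63 < (s : Int) ∧ (s : Int) < 67 then a ++ [c] else a) = (p ++ [c], a)
        rw [if_pos hc, if_neg hna], hs, ih]
      have h1 : (c :: t).take (7 - s) = c :: t.take (7 - (s + 1)) := by
        have h : 7 - s = (7 - (s+1)) + 1 := by omega
        rw [h, List.take_succ_cons]
      have h2 : (c :: t).drop (64 - s) = t.drop (64 - (s + 1)) := by
        have h : 64 - s = (64 - (s+1)) + 1 := by omega
        rw [h, List.drop_succ_cons]
      have h3 : max 64 s = max 64 (s + 1) := by omega
      simp [h1, h2, h3]
    · have hn6 : ¬ ((s : Int) ≤ 6) := by omega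
      have ht : (c :: t).take (7 - s) = [] := by
        have h : 7 - s = 0 := by omega
        simp [h]
      by_cases ha : 64 ≤ s ∧ s ≤ 66
      · have hcond : (63 < (s : Int) ∧ (s : Int) < 67) := by omega
        rw [show selfChipsStep (p, a) ((s : Int), c) = (p, a ++ [c]) from by
          show (if (s : Int) ≤ 6 then p ++ [c] else p,
                if 63 < (s : Int) ∧ (s : Int) < 67 then a ++ [c] else a) = (p, a ++ [c])
          rw [if_neg hn6, if_pos hcond], hs, ih]
        have ht' : t.take (7 - (s + 1)) = [] := by
          have h : 7 - (s + 1) = 0 := by omega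
          simp [h]
        have hd : (c :: t).drop (64 - s) = c :: t := by
          have h : 64 - s = 0 := by omega
          simp [h]
        have hd' : t.drop (64 - (s + 1)) = t := by
          have h : 64 - (s + 1) = 0 := by omega
          simp [h]
        have htk : (c :: t).take (67 - max 64 s) = c :: t.take (67 - max 64 (s + 1)) := by
          have h1 : 67 - max 64 s = (67 - max 64 (s + 1)) + 1 := by omega
          rw [h1, List.take_succ_cons]
        simp [ht, hd, htk]
        exact ⟨Or.inl (by omega), by rw [show 63 - s = 0 from by omega, List.drop_zero]⟩
      · have hcond : ¬ (63 < (s : Int) ∧ (s : Int) < 67) := by omega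
        rw [show selfChipsStep (p, a) ((s : Int), c) = (p, a) from by
          show (if (s : Int) ≤ 6 then p ++ [c] else p,
                if 63 < (s : Int) ∧ (s : Int) < 67 then a ++ [c] else a) = (p, a)
          rw [if_neg hn6, if_neg hcond], hs, ih]
        have ht' : t.take (7 - (s + 1)) = [] := by
          have h : 7 - (s + 1) = 0 := by omega
          simp [h]
        by_cases hlt : s ≤ 63
        · have hd2 : (c :: t).drop (64 - s) = t.drop (64 - (s + 1)) := by
            have h : 64 - s = (64 - (s + 1)) + 1 := by omega
            rw [h, List.drop_succ_cons]
          have hm : max 64 s = max 64 (s + 1) := by omega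
          simp [ht, hd2, hm]
          exact Or.inl (by omega)
        · have h67 : 67 ≤ s := by omega
          have htk : 67 - max 64 s = 0 := by omega
          have htk' : 67 - max 64 (s + 1) = 0 := by omega
          simp [ht, htk, htk']
          exact Or.inl (by omega)

-- ===== VERDICT (by name: the statement is the Claim_ definition above) =====
theorem self_chips_spec : Claim_equal_self_chips := by
  intro line _
  unfold Spec_self_chips self_chips self_chips_alt
  have h0 : ((0 : Int)) = ((0 : Nat) : Int) := rfl
  rw [h0, selfChips_loop]
  rw [show PySem.List.slice line.toList none (some 7) = line.toList.take 7 from by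
        simpa using PySem.List.slice_to_natCast line.toList 7,
      show PySem.List.slice line.toList (some 64) (some 67) = (line.toList.drop 64).take 3 from by
        simpa using PySem.List.slice_natCast line.toList 64 67]
  norm_num
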